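-- pv_equiv track=rewrite | github.com/hamiltonparker/Learning | HNFGen.py | base_mono_2
-- ===== SOURCE A (Python) =====
-- def find_HNF_diagonal(size):
--
--     """Generats allowable values for the diagonal of an HNF
--        given a particular size
--
--     Args:
--         size (int): The determinate of the HNF matricies
--
--     Returns:
--         diags_list (list, int): a list of allowable values for a given size
--     """
--
--     diags_list = []
--     for i in range(size):
--         a = i + 1
--         if (size / a) % 1 == 0:
--             for j in range(size // a):
--                 c = j + 1
--                 if (size / a / c) % 1 == 0:
--                     f = size // a // c
--                     diags_list.append([a,c,f])
--     return diags_list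
--
-- def base_mono_2(size):
--
--     """Generates symmetry preserving HNF's of a given size
--        for a base centered monoclinic basis
--
--     Args:
--         size (int): The determinate of the HNF matricies
--
--     Returns:
--         list (int): The generated HNF matricies
--     """
--
--     symHNF = []
--     diags = find_HNF_diagonal(size)
--     for i in diags:
--         a = i[0]
--         c = i[1]
--         f = i[2]
--         for j in range(c):
--             b = j
--             if ((a + 2 * b) / c) % 1 == 0:
--                 for k in range (f):
--                     e = k
--                     if (2 * e / f) % 1 == 0:
--                         if ((a + 2 * b) * e / (c * f)) % 1 == 0:
--                             for l in range(f):
--                                 d = l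
--                                 symHNF.append([[a,0,0], [b,c,0], [d,e,f]])
--     return symHNF
-- ===== SOURCE B (Python) =====
-- def _bsols(a, c):
--     """Solutions b in [0, c) of the congruence 2*b == -a (mod c), ascending."""
--     if c % 2 == 1:
--         return [(-a * ((c + 1) // 2)) % c]
--     if a % 2 == 0:
--         b1 = (-(a // 2)) % (c // 2)
--         return [b1, b1 + c // 2]
--     return []
--
--
-- def _esols(q, f):
--     """Solutions e in [0, f) of f | 2*e with q*e == 0 (mod f), ascending (q = (a+2b)/c)."""
--     if f % 2 == 0 and q % 2 == 0:
--         return [0, f // 2]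
--     return [0]
--
--
-- def base_mono_2(size):
--     """Same HNFs as the original, but b and e come from solving the congruences
--     2b == -a (mod c) and 2e == 0 (mod f) directly instead of scanning ranges."""
--     symHNF = []
--     for a in range(1, size + 1):
--         if size % a:
--             continue
--         n = size // a
--         for c in range(1, n + 1):
--             if n % c:
--                 continue
--             f = n // c
--             for b in _bsols(a, c):
--                 for e in _esols((a + 2 * b) // c, f):
--                     for d in range(f):
--                         symHNF.append([[a, 0, 0], [b, c, 0], [d, e, f]])
--     return symHNF
-- ===== Notes on version B (the rewrite author's own statement) =====
-- stated objective: alternative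
-- what changed: The inner scans over b in range(c) and e in range(f) with per-element divisibility tests are replaced by closed-form solutions of the two underlying modular congruences (emitting only the solutions), and the diagonal helper's rescan is fused inline into the divisor loops.
import Mathlib
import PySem

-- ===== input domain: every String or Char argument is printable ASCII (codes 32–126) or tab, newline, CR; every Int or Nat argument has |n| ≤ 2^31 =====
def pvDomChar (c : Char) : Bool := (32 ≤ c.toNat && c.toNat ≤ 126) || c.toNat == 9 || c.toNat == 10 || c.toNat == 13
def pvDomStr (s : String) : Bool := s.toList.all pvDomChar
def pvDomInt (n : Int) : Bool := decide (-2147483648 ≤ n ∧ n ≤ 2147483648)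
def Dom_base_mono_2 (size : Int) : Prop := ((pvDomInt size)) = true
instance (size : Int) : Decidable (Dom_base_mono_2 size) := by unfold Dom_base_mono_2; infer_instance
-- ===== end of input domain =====

-- B replaces A's inner divisibility scans (over b in range(c) and e in range(f)) by closed-form
-- congruence solving; same return value. Python's float tests '(x / y) % 1 == 0' are ported as
-- integer divisibility tests: on the stated domain (|size| ≤ 2^31) every quotient that A forms is
-- small enough that the float test is exactly integer divisibility.

-- ===== PORT A =====
def find_HNF_diagonal (size : Int) : List (List Int) :=
  (PySem.List.pyRange 0 size 1).foldl (fun diags i =>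
    let a := i + 1
    if PySem.Int.mod size a == 0 then          -- (size / a) % 1 == 0
      (PySem.List.pyRange 0 (PySem.Int.floordiv size a) 1).foldl (fun diags j =>
        let c := j + 1
        if PySem.Int.mod (PySem.Int.floordiv size a) c == 0 then   -- (size / a / c) % 1 == 0
          let f := PySem.Int.floordiv (PySem.Int.floordiv size a) c
          diags ++ [[a, c, f]]
        else diags) diags
    else diags) []

def base_mono_2 (size : Int) : List (List (List Int)) :=
  (find_HNF_diagonal size).foldl (fun symHNF i =>
    let a := PySem.List.pyGetD i 0 0
    let c := PySem.List.pyGetD i 1 0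
    let f := PySem.List.pyGetD i 2 0
    (PySem.List.pyRange 0 c 1).foldl (fun symHNF j =>
      let b := j
      if PySem.Int.mod (a + 2 * b) c == 0 then           -- ((a+2b)/c) % 1 == 0
        (PySem.List.pyRange 0 f 1).foldl (fun symHNF k =>
          let e := k
          if PySem.Int.mod (2 * e) f == 0 then           -- (2e/f) % 1 == 0
            if PySem.Int.mod ((a + 2 * b) * e) (c * f) == 0 then  -- ((a+2b)e/(cf)) % 1 == 0
              (PySem.List.pyRange 0 f 1).foldl (fun symHNF l =>
                symHNF ++ [[[a, 0, 0], [b, c, 0], [l, e, f]]]) symHNF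
            else symHNF
          else symHNF) symHNF
      else symHNF) symHNF) []

-- ===== PORT B =====
-- helper _bsols of Source B: the solutions b in [0, c) of 2*b ≡ -a (mod c), ascending
def bsols (a c : Int) : List Int :=
  if PySem.Int.mod c 2 == 1 then
    [PySem.Int.mod (-a * PySem.Int.floordiv (c + 1) 2) c]
  else if PySem.Int.mod a 2 == 0 then
    [PySem.Int.mod (-(PySem.Int.floordiv a 2)) (PySem.Int.floordiv c 2),
     PySem.Int.mod (-(PySem.Int.floordiv a 2)) (PySem.Int.floordiv c 2) + PySem.Int.floordiv c 2]
  else []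

-- helper _esols of Source B: the solutions e in [0, f) of f | 2e with q*e ≡ 0 (mod f), ascending
def esols (q f : Int) : List Int :=
  if PySem.Int.mod f 2 == 0 && PySem.Int.mod q 2 == 0 then [0, PySem.Int.floordiv f 2]
  else [0]

def base_mono_2_alt (size : Int) : List (List (List Int)) :=
  (PySem.List.pyRange 1 (size + 1) 1).foldl (fun symHNF a =>
    if PySem.Int.mod size a != 0 then symHNF
    else
      (PySem.List.pyRange 1 (PySem.Int.floordiv size a + 1) 1).foldl (fun symHNF c =>
        if PySem.Int.mod (PySem.Int.floordiv size a) c != 0 then symHNF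
        else
          (bsols a c).foldl (fun symHNF b =>
            (esols (PySem.Int.floordiv (a + 2 * b) c)
                   (PySem.Int.floordiv (PySem.Int.floordiv size a) c)).foldl (fun symHNF e =>
              (PySem.List.pyRange 0 (PySem.Int.floordiv (PySem.Int.floordiv size a) c) 1).foldl
                (fun symHNF d =>
                  symHNF ++ [[[a, 0, 0], [b, c, 0],
                              [d, e, PySem.Int.floordiv (PySem.Int.floordiv size a) c]]])
                symHNF) symHNF) symHNF) symHNF) []

-- ===== PRECONDITION & SPEC =====
def Spec_base_mono_2 (size : Int) (out : List (List (List Int))) : Prop := out = base_mono_2_alt size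
instance (size : Int) (out : List (List (List Int))) : Decidable (Spec_base_mono_2 size out) := by unfold Spec_base_mono_2; infer_instance

-- ===== CLAIM (what is proved, stated in full; the proofs are below) =====
def Claim_equal_base_mono_2 : Prop := ∀ (size : Int), Dom_base_mono_2 size → Spec_base_mono_2 size (base_mono_2 size)

-- ===== LEMMAS AND PROOFS =====

-- generic loop shape: a foldl whose body is 'acc ++ (something depending only on x)'
theorem foldl_extend {α β : Type} (l : List α) (gg : α → List β) (g : List β → α → List β)
    (h : ∀ acc x, g acc x = acc ++ gg x) : ∀ init, l.foldl g init = init ++ l.flatMap gg := by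
  induction l with
  | nil => intro init; simp
  | cons x xs ih => intro init; simp [List.foldl_cons, h, ih, List.append_assoc]

theorem ite_bne {α : Type} (x y : Int) (A B : α) :
    (if x != y then A else B) = if x == y then B else A := by
  cases h : (x == y) <;> simp [bne, h]

theorem flatMap_ite_nil {α β : Type} (l : List α) (p : α → Bool) (F : α → List β) :
    l.flatMap (fun x => if p x then F x else []) = (l.filter p).flatMap F := by
  induction l with
  | nil => rfl
  | cons x xs ih => by_cases h : p x <;> simp [h, ih]

theorem flatMap_congr_mem {α β : Type} (l : List α) (f g : α → List β)
    (h : ∀ x ∈ l, f x = g x) : l.flatMap f = l.flatMap g := by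
  induction l with
  | nil => rfl
  | cons x xs ih =>
    simp only [List.flatMap_cons]
    rw [h x (by simp), ih (fun y hy => h y (by simp [hy]))]

theorem flatMap_map' {α β γ : Type} (l : List α) (g : α → β) (F : β → List γ) :
    (l.map g).flatMap F = l.flatMap (fun x => F (g x)) := by
  induction l <;> simp [*]

theorem pyRange_shift (m : Int) :
    PySem.List.pyRange 1 (m + 1) 1 = (PySem.List.pyRange 0 m 1).map (· + 1) := by
  simp only [PySem.List.pyRange_one, List.map_map]
  have : (m + 1 - 1).toNat = (m - 0).toNat := by omega
  rw [this]
  exact List.map_congr_left (fun k _ => by simp; omega)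

-- two strictly ascending integer lists with the same members are equal
theorem sorted_lt_eq_of_mem_iff : ∀ (l₁ l₂ : List Int), l₁.Pairwise (· < ·) → l₂.Pairwise (· < ·) →
    (∀ x, x ∈ l₁ ↔ x ∈ l₂) → l₁ = l₂ := by
  intro l₁
  induction l₁ with
  | nil =>
    intro l₂ _ _ hm
    cases l₂ with
    | nil => rfl
    | cons y ys => exact absurd ((hm y).mpr (by simp)) (by simp)
  | cons x xs ih =>
    intro l₂ h1 h2 hm
    cases l₂ with
    | nil => exact absurd ((hm x).mp (by simp)) (by simp)
    | cons y ys =>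
      have hx := (hm x).mp (by simp)
      have hy := (hm y).mpr (by simp)
      have hxy : x = y := by
        rcases List.mem_cons.mp hx with h | hx'
        · exact h
        · rcases List.mem_cons.mp hy with h | hy'
          · omega
          · have hlt1 : y < x := (List.pairwise_cons.mp h2).1 x hx'
            have hlt2 : x < y := (List.pairwise_cons.mp h1).1 y hy'
            omega
      subst hxy
      have htail : ∀ z, z ∈ xs ↔ z ∈ ys := by
        intro z
        constructor
        · intro hz
          have hlt : x < z := (List.pairwise_cons.mp h1).1 z hz
          rcases List.mem_cons.mp ((hm z).mp (by simp [hz])) with h | h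
          · omega
          · exact h
        · intro hz
          have hlt : x < z := (List.pairwise_cons.mp h2).1 z hz
          rcases List.mem_cons.mp ((hm z).mpr (by simp [hz])) with h | h
          · omega
          · exact h
      rw [ih ys (List.pairwise_cons.mp h1).2 (List.pairwise_cons.mp h2).2 htail]

-- the matrices emitted for one (a, b, c, e, f)
def matsL (a b c e f : Int) : List (List (List Int)) :=
  (PySem.List.pyRange 0 f 1).map (fun d => [[a, 0, 0], [b, c, 0], [d, e, f]])

-- A's inner three loops for one diagonal, as a flatMap
def innerA (a c f : Int) : List (List (List Int)) :=
  (PySem.List.pyRange 0 c 1).flatMap (fun b =>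
    if PySem.Int.mod (a + 2 * b) c == 0 then
      (PySem.List.pyRange 0 f 1).flatMap (fun e =>
        if PySem.Int.mod (2 * e) f == 0 && PySem.Int.mod ((a + 2 * b) * e) (c * f) == 0 then
          matsL a b c e f
        else [])
    else [])

-- B's inner loops for one diagonal, as a flatMap
def innerB (a c f : Int) : List (List (List Int)) :=
  (bsols a c).flatMap (fun b =>
    (esols (PySem.Int.floordiv (a + 2 * b) c) f).flatMap (fun e => matsL a b c e f))

-- membership characterization of bsols
theorem bsols_char (a c x : Int) (hc : 1 ≤ c) :
    x ∈ bsols a c ↔ 0 ≤ x ∧ x < c ∧ c ∣ a + 2 * x := by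
  have hc0 : c ≠ 0 := by omega
  have hmc : ∀ y : Int, PySem.Int.mod y c = y % c := fun y =>
    PySem.Int.mod_eq_emod_of_pos (by omega)
  have hm2 : ∀ y : Int, PySem.Int.mod y 2 = y % 2 := fun y =>
    PySem.Int.mod_eq_emod_of_pos (by omega)
  have hd2 : ∀ y : Int, PySem.Int.floordiv y 2 = y / 2 := fun y =>
    PySem.Int.floordiv_eq_ediv_of_pos (by omega)
  unfold bsols
  rcases Int.emod_two_eq c with hpar | hpar
  · -- c even
    rw [if_neg (by simp [hm2, hpar])]
    rcases Int.emod_two_eq a with hapar | hapar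
    · -- a even: two solutions b1, b1 + c/2
      rw [if_pos (by simp [hm2, hapar])]
      simp only [hd2, hmc]
      set t := c / 2 with ht
      set s := a / 2 with hs
      have h2t : 2 * t = c := by omega
      have h2s : 2 * s = a := by omega
      have ht1 : 1 ≤ t := by omega
      have hmct : ∀ y : Int, PySem.Int.mod y t = y % t := fun y =>
        PySem.Int.mod_eq_emod_of_pos (by omega)
      simp only [hmct]
      set b1 := (-s) % t with hb1
      have hb1a : 0 ≤ b1 := Int.emod_nonneg _ (by omega)
      have hb1b : b1 < t := Int.emod_lt_of_pos _ (by omega)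
      have hQ : t * ((-s) / t) + b1 = -s := Int.mul_ediv_add_emod _ _
      have hdvd1 : t ∣ s + b1 := ⟨-((-s) / t), by linear_combination hQ⟩
      constructor
      · intro hx
        simp only [List.mem_cons, List.not_mem_nil, or_false] at hx
        obtain ⟨k, hk⟩ := hdvd1
        rcases hx with rfl | rfl
        · exact ⟨by omega, by omega, ⟨k, by linear_combination 2 * hk - h2s + k * h2t⟩⟩
        · exact ⟨by omega, by omega, ⟨k + 1, by linear_combination 2 * hk - h2s + (k + 1) * h2t⟩⟩
      · rintro ⟨hx0, hxc, ⟨k, hk⟩⟩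
        have hsx : s + x = t * k := by
          have : 2 * s + 2 * x = 2 * (t * k) := by linear_combination hk + h2s - k * h2t
          linarith
        obtain ⟨m, hm'⟩ := hdvd1
        have hj : x - b1 = t * (k - m) := by rw [mul_sub]; linarith
        have hk1 : t * (k - m) < t * 2 := by linarith
        have hk2 : t * (-1) < t * (k - m) := by linarith
        have hkm1 : k - m < 2 := lt_of_mul_lt_mul_left hk1 (by omega)
        have hkm2 : -1 < k - m := lt_of_mul_lt_mul_left hk2 (by omega)
        have hxv : x = b1 ∨ x = b1 + t := by
          rcases (by omega : k - m = 0 ∨ k - m = 1) with h | h <;> rw [h] at hj <;> [left; right] <;> omega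
        rcases hxv with rfl | rfl <;> simp
    · -- a odd: no solutions
      rw [if_neg (by simp [hm2, hapar])]
      simp only [List.not_mem_nil, false_iff]
      rintro ⟨_, _, ⟨k, hk⟩⟩
      have h2t : 2 * (c / 2) = c := by omega
      have : (2 : Int) ∣ a := ⟨(c / 2) * k - x, by linear_combination hk - k * h2t⟩
      omega
  · -- c odd: unique solution
    rw [if_pos (by simp [hm2, hpar])]
    simp only [hd2, hmc]
    set t := (c + 1) / 2 with ht
    have h2t : 2 * t = c + 1 := by omega
    set b0 := (-a * t) % c with hb0
    have hb0a : 0 ≤ b0 := Int.emod_nonneg _ hc0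
    have hb0b : b0 < c := Int.emod_lt_of_pos _ (by omega)
    have hQ : c * ((-a * t) / c) + b0 = -a * t := Int.mul_ediv_add_emod _ _
    have hdvd0 : c ∣ a + 2 * b0 :=
      ⟨-a - 2 * ((-a * t) / c), by linear_combination 2 * hQ - a * h2t⟩
    constructor
    · rintro h
      have hx : x = b0 := by simpa using h
      exact ⟨by omega, by omega, hx ▸ hdvd0⟩
    · rintro ⟨hx0, hxc, ⟨k, hk⟩⟩
      obtain ⟨m, hm'⟩ := hdvd0
      have hdd : c ∣ (x - b0) * 2 := ⟨k - m, by rw [mul_sub]; linarith⟩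
      have hgcd : Int.gcd c 2 = 1 := by
        have : Odd c.natAbs := Int.natAbs_odd.mpr (Int.odd_iff.mpr hpar)
        simpa [Int.gcd] using Nat.coprime_two_right.mpr this
      have hco : IsCoprime c 2 := Int.isCoprime_iff_gcd_eq_one.mpr hgcd
      obtain ⟨j, hj⟩ := hco.dvd_of_dvd_mul_right hdd
      have hj1 : c * j < c * 1 := by linarith
      have hj2 : c * (-1) < c * j := by linarith
      have hj0 : j = 0 := by
        have := lt_of_mul_lt_mul_left hj1 (by omega)
        have := lt_of_mul_lt_mul_left hj2 (by omega)
        omega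
      rw [hj0, mul_zero] at hj
      simp [show x = b0 by omega]

theorem mem_bsols_dvd (a c b : Int) (hc : 1 ≤ c) (hb : b ∈ bsols a c) : c ∣ a + 2 * b :=
  ((bsols_char a c b hc).mp hb).2.2

theorem bsols_pairwise (a c : Int) (hc : 1 ≤ c) : (bsols a c).Pairwise (· < ·) := by
  unfold bsols
  split_ifs with h1 h2
  · simp
  · have hm2 : PySem.Int.mod c 2 = c % 2 := PySem.Int.mod_eq_emod_of_pos (by omega)
    have hd2 : PySem.Int.floordiv c 2 = c / 2 := PySem.Int.floordiv_eq_ediv_of_pos (by omega)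
    have hpar : c % 2 = 0 := by
      rcases Int.emod_two_eq c with h | h
      · exact h
      · exact absurd (by simp [hm2, h]) h1
    simp only [hd2]
    refine List.Pairwise.cons ?_ (.cons (by simp) .nil)
    intro y hy
    simp only [List.mem_cons, List.not_mem_nil, or_false] at hy
    subst hy
    omega
  · simp

-- characterization of A's b-filter as bsols
theorem bfilter_eq_bsols (a c : Int) (hc : 1 ≤ c) :
    (PySem.List.pyRange 0 c 1).filter (fun b => PySem.Int.mod (a + 2 * b) c == 0) = bsols a c := by
  apply sorted_lt_eq_of_mem_iff
  · exact (PySem.List.pairwise_lt_pyRange_one 0 c).filter _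
  · exact bsols_pairwise a c hc
  · intro x
    rw [List.mem_filter, PySem.List.mem_pyRange_one, bsols_char a c x hc]
    simp [PySem.Int.mod_eq_zero_iff_dvd]
    tauto

theorem esols_pairwise (q f : Int) (hf : 1 ≤ f) : (esols q f).Pairwise (· < ·) := by
  unfold esols
  split_ifs with h
  · have hmf : PySem.Int.mod f 2 = f % 2 := PySem.Int.mod_eq_emod_of_pos (by omega)
    have hdf : PySem.Int.floordiv f 2 = f / 2 := PySem.Int.floordiv_eq_ediv_of_pos (by omega)
    have hpar : f % 2 = 0 := by
      rcases Int.emod_two_eq f with h' | h'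
      · exact h'
      · rw [hmf, h'] at h; simp at h
    simp only [hdf]
    refine List.Pairwise.cons ?_ (.cons (by simp) .nil)
    intro y hy
    simp only [List.mem_cons, List.not_mem_nil, or_false] at hy
    omega
  · simp

-- characterization of A's e-filter as esols
theorem efilter_eq_esols (a b c f : Int) (hc : 1 ≤ c) (hf : 1 ≤ f) (hd : c ∣ a + 2 * b) :
    (PySem.List.pyRange 0 f 1).filter (fun e =>
        PySem.Int.mod (2 * e) f == 0 && PySem.Int.mod ((a + 2 * b) * e) (c * f) == 0)
      = esols (PySem.Int.floordiv (a + 2 * b) c) f := by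
  have hc0 : c ≠ 0 := by omega
  have hf0 : f ≠ 0 := by omega
  set q := PySem.Int.floordiv (a + 2 * b) c with hqdef
  have hqe : q = (a + 2 * b) / c := PySem.Int.floordiv_eq_ediv_of_pos (by omega)
  have hq2 : a + 2 * b = c * q := by
    rw [hqe]
    linarith [Int.ediv_mul_cancel hd]
  have hmf : PySem.Int.mod f 2 = f % 2 := PySem.Int.mod_eq_emod_of_pos (by omega)
  have hmq : PySem.Int.mod q 2 = q % 2 := PySem.Int.mod_eq_emod_of_pos (by omega)
  have hdf : PySem.Int.floordiv f 2 = f / 2 := PySem.Int.floordiv_eq_ediv_of_pos (by omega)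
  apply sorted_lt_eq_of_mem_iff
  · exact (PySem.List.pairwise_lt_pyRange_one 0 f).filter _
  · exact esols_pairwise q f hf
  · intro x
    rw [List.mem_filter, PySem.List.mem_pyRange_one]
    simp only [Bool.and_eq_true, beq_iff_eq, PySem.Int.mod_eq_zero_iff_dvd]
    unfold esols
    constructor
    · rintro ⟨⟨hx0, hxf⟩, ⟨k, hk⟩, ⟨m, hm'⟩⟩
      have hk1 : f * k < f * 2 := by linarith
      have hk2 : f * (-1) < f * k := by linarith
      have hkv : k = 0 ∨ k = 1 := by
        have := lt_of_mul_lt_mul_left hk1 (by omega)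
        have := lt_of_mul_lt_mul_left hk2 (by omega)
        omega
      rcases hkv with rfl | rfl
      · have hx : x = 0 := by omega
        split_ifs <;> simp [hx]
      · -- 2x = f : x = f/2, f even; need q even from second condition
        have hzf : 2 * x = f := by omega
        have hx1 : 1 ≤ x := by omega
        rw [hq2] at hm'
        have h' : c * (q * x) = c * (f * m) := by rw [← mul_assoc, ← mul_assoc]; exact hm'
        have hqx : q * x = f * m := mul_left_cancel₀ hc0 h'
        have hq2m : q = 2 * m := by
          have hxx : x * q = x * (2 * m) := by linear_combination hqx - m * hzf
          exact mul_left_cancel₀ (by omega) hxx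
        rw [if_pos (by simp [hmf, hmq]; omega)]
        simp [hdf]
        omega
    · intro hx
      split_ifs at hx with h
      · have hpar : f % 2 = 0 ∧ q % 2 = 0 := by
          rw [hmf, hmq] at h
          simpa using h
        simp only [hdf, List.mem_cons, List.not_mem_nil, or_false] at hx
        rcases hx with rfl | rfl
        · exact ⟨⟨le_refl 0, by omega⟩, ⟨0, by ring⟩, ⟨0, by ring⟩⟩
        · have hzf : 2 * (f / 2) = f := by omega
          obtain ⟨m, hm2⟩ : ∃ m, q = 2 * m := ⟨q / 2, by omega⟩
          refine ⟨⟨by omega, by omega⟩, ⟨1, by omega⟩, ⟨m, ?_⟩⟩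
          linear_combination (f / 2) * hq2 + c * (f / 2) * hm2 + c * m * hzf
      · simp only [List.mem_cons, List.not_mem_nil, or_false] at hx
        subst hx
        exact ⟨⟨le_refl 0, by omega⟩, ⟨0, by ring⟩, ⟨0, by ring⟩⟩

theorem innerA_eq_innerB (a c f : Int) (hc : 1 ≤ c) (hf : 1 ≤ f) : innerA a c f = innerB a c f := by
  unfold innerA innerB
  rw [flatMap_ite_nil, bfilter_eq_bsols a c hc]
  apply flatMap_congr_mem
  intro b hb
  rw [flatMap_ite_nil, efilter_eq_esols a b c f hc hf (mem_bsols_dvd a c b hc hb)]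

-- closed form of A's diagonal helper
theorem find_closed (size : Int) :
    find_HNF_diagonal size = (PySem.List.pyRange 0 size 1).flatMap (fun i =>
      if PySem.Int.mod size (i + 1) == 0 then
        (PySem.List.pyRange 0 (PySem.Int.floordiv size (i + 1)) 1).flatMap (fun j =>
          if PySem.Int.mod (PySem.Int.floordiv size (i + 1)) (j + 1) == 0 then
            [[i + 1, j + 1, PySem.Int.floordiv (PySem.Int.floordiv size (i + 1)) (j + 1)]]
          else [])
      else []) := by
  unfold find_HNF_diagonal
  refine (foldl_extend _ (fun i =>
      if PySem.Int.mod size (i + 1) == 0 then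
        (PySem.List.pyRange 0 (PySem.Int.floordiv size (i + 1)) 1).flatMap (fun j =>
          if PySem.Int.mod (PySem.Int.floordiv size (i + 1)) (j + 1) == 0 then
            [[i + 1, j + 1, PySem.Int.floordiv (PySem.Int.floordiv size (i + 1)) (j + 1)]]
          else [])
      else []) _ ?_ []).trans (by simp)
  intro acc i
  cases h : (PySem.Int.mod size (i + 1) == 0) <;> simp only [h, if_true, if_false, Bool.false_eq_true]
  · simp
  · refine (foldl_extend _ _ _ ?_ acc)
    intro acc' j
    cases h2 : (PySem.Int.mod (PySem.Int.floordiv size (i + 1)) (j + 1) == 0) <;>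
      simp [h2]

-- closed form of port A
theorem base_mono_2_closed (size : Int) :
    base_mono_2 size = (PySem.List.pyRange 0 size 1).flatMap (fun i =>
      if PySem.Int.mod size (i + 1) == 0 then
        (PySem.List.pyRange 0 (PySem.Int.floordiv size (i + 1)) 1).flatMap (fun j =>
          if PySem.Int.mod (PySem.Int.floordiv size (i + 1)) (j + 1) == 0 then
            innerA (i + 1) (j + 1) (PySem.Int.floordiv (PySem.Int.floordiv size (i + 1)) (j + 1))
          else [])
      else []) := by
  unfold base_mono_2
  rw [find_closed]
  refine (foldl_extend _ (fun x => innerA (PySem.List.pyGetD x 0 0) (PySem.List.pyGetD x 1 0)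
      (PySem.List.pyGetD x 2 0)) _ ?_ []).trans ?_
  · intro acc x
    unfold innerA
    refine (foldl_extend _ _ _ ?_ acc)
    intro acc' j
    cases hb : (PySem.Int.mod (PySem.List.pyGetD x 0 0 + 2 * j) (PySem.List.pyGetD x 1 0) == 0) <;>
      simp only [hb, if_true, if_false, Bool.false_eq_true]
    · simp
    · refine (foldl_extend _ _ _ ?_ acc')
      intro acc'' k
      cases h1 : (PySem.Int.mod (2 * k) (PySem.List.pyGetD x 2 0) == 0) <;>
        cases h2 : (PySem.Int.mod ((PySem.List.pyGetD x 0 0 + 2 * j) * k)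
          (PySem.List.pyGetD x 1 0 * PySem.List.pyGetD x 2 0) == 0) <;>
        simp only [h1, h2, Bool.and_self, Bool.and_true, Bool.true_and, Bool.and_false,
          if_true, if_false, Bool.false_eq_true] <;> try simp
      simpa [matsL] using PySem.List.foldl_append_singleton_eq_map
        (fun d => [[PySem.List.pyGetD x 0 0, 0, 0], [j, PySem.List.pyGetD x 1 0, 0],
                   [d, k, PySem.List.pyGetD x 2 0]]) _ acc''
  · rw [List.nil_append, List.flatMap_assoc]
    apply flatMap_congr_mem
    intro i _
    by_cases h : (PySem.Int.mod size (i + 1) == 0) = true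
    · simp only [h, if_true]
      rw [List.flatMap_assoc]
      apply flatMap_congr_mem
      intro j _
      by_cases h2 : (PySem.Int.mod (PySem.Int.floordiv size (i + 1)) (j + 1) == 0) = true <;>
        simp [h2, PySem.List.pyGetD, PySem.List.pyGet?, PySem.List.pyIdx?]
    · simp [h]

-- closed form of port B
theorem base_mono_2_alt_closed (size : Int) :
    base_mono_2_alt size = (PySem.List.pyRange 1 (size + 1) 1).flatMap (fun a =>
      if PySem.Int.mod size a == 0 then
        (PySem.List.pyRange 1 (PySem.Int.floordiv size a + 1) 1).flatMap (fun c =>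
          if PySem.Int.mod (PySem.Int.floordiv size a) c == 0 then
            innerB a c (PySem.Int.floordiv (PySem.Int.floordiv size a) c)
          else [])
      else []) := by
  unfold base_mono_2_alt
  refine (foldl_extend _ (fun a =>
      if PySem.Int.mod size a == 0 then
        (PySem.List.pyRange 1 (PySem.Int.floordiv size a + 1) 1).flatMap (fun c =>
          if PySem.Int.mod (PySem.Int.floordiv size a) c == 0 then
            innerB a c (PySem.Int.floordiv (PySem.Int.floordiv size a) c)
          else [])
      else []) _ ?_ []).trans (by simp)
  intro acc a
  beta_reduce
  rw [ite_bne]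
  by_cases h : (PySem.Int.mod size a == 0) = true
  case neg => rw [if_neg h, if_neg h]; simp
  case pos =>
    rw [if_pos h, if_pos h]
    refine (foldl_extend _ _ _ ?_ acc)
    intro acc' c
    beta_reduce
    rw [ite_bne]
    by_cases h2 : (PySem.Int.mod (PySem.Int.floordiv size a) c == 0) = true
    case neg => rw [if_neg h2, if_neg h2]; simp
    case pos =>
      rw [if_pos h2, if_pos h2]
      unfold innerB
      refine (foldl_extend _ _ _ ?_ acc')
      intro acc'' b
      refine (foldl_extend _ _ _ ?_ acc'')
      intro acc3 e
      beta_reduce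
      simpa [matsL] using PySem.List.foldl_append_singleton_eq_map
        (fun d => [[a, 0, 0], [b, c, 0],
          [d, e, PySem.Int.floordiv (PySem.Int.floordiv size a) c]]) _ acc3

-- n / a ≥ 1 when 1 ≤ a ≤ n
theorem one_le_ediv (n a : Int) (ha : 1 ≤ a) (han : a ≤ n) : 1 ≤ n / a := by
  rw [Int.le_ediv_iff_mul_le (by omega)]
  omega

-- ===== VERDICT (by name: the statement is the Claim_ definition above) =====
theorem base_mono_2_spec : Claim_equal_base_mono_2 := by
  intro size _
  unfold Spec_base_mono_2
  rw [base_mono_2_closed, base_mono_2_alt_closed, pyRange_shift, flatMap_map']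
  apply flatMap_congr_mem
  intro i hi
  have hi' : 0 ≤ i ∧ i < size := PySem.List.mem_pyRange_one.mp hi
  by_cases h : (PySem.Int.mod size (i + 1) == 0) = true
  · simp only [h, if_true]
    have hda : PySem.Int.floordiv size (i + 1) = size / (i + 1) :=
      PySem.Int.floordiv_eq_ediv_of_pos (by omega)
    have hn1 : 1 ≤ PySem.Int.floordiv size (i + 1) := by
      rw [hda]; exact one_le_ediv size (i + 1) (by omega) (by omega)
    rw [pyRange_shift, flatMap_map']
    apply flatMap_congr_mem
    intro j hj
    have hj' : 0 ≤ j ∧ j < PySem.Int.floordiv size (i + 1) := PySem.List.mem_pyRange_one.mp hj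
    by_cases h2 : (PySem.Int.mod (PySem.Int.floordiv size (i + 1)) (j + 1) == 0) = true
    · simp only [h2, if_true]
      have hdc : PySem.Int.floordiv (PySem.Int.floordiv size (i + 1)) (j + 1)
          = PySem.Int.floordiv size (i + 1) / (j + 1) :=
        PySem.Int.floordiv_eq_ediv_of_pos (by omega)
      have hf1 : 1 ≤ PySem.Int.floordiv (PySem.Int.floordiv size (i + 1)) (j + 1) := by
        rw [hdc]
        exact one_le_ediv _ (j + 1) (by omega) (by omega)
      exact innerA_eq_innerB (i + 1) (j + 1) _ (by omega) hf1
    · simp [h2]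
  · simp [h]
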